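-- pv_equiv track=rewrite | github.com/pypi-data/pypi-mirror-278 | packages/litellm/litellm-1.40.6-py3-none-any.whl/litellm/llms/prompt_templates/factory.py | map_system_message_pt
-- ===== SOURCE A (Python) =====
-- def map_system_message_pt(messages: list) -> list:
--     """
--     Convert 'system' message to 'user' message if provider doesn't support 'system' role.
--
--     Enabled via `completion(...,supports_system_message=False)`
--
--     If next message is a user message or assistant message -> merge system prompt into it
--
--     if next message is system -> append a user message instead of the system message
--     """
--
--     new_messages = []
--     for i, m in enumerate(messages):
--         if m["role"] == "system":
--             if i < len(messages) - 1:  # Not the last message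
--                 next_m = messages[i + 1]
--                 next_role = next_m["role"]
--                 if (
--                     next_role == "user" or next_role == "assistant"
--                 ):  # Next message is a user or assistant message
--                     # Merge system prompt into the next message
--                     next_m["content"] = m["content"] + " " + next_m["content"]
--                 elif next_role == "system":  # Next message is a system message
--                     # Append a user message instead of the system message
--                     new_message = {"role": "user", "content": m["content"]}
--                     new_messages.append(new_message)
--             else:  # Last message
--                 new_message = {"role": "user", "content": m["content"]}
--                 new_messages.append(new_message)
--         else:  # Not a system message
--             new_messages.append(m)
--
--     return new_messages
-- ===== SOURCE B (Python) =====
-- def map_system_message_pt(messages: list) -> list: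
--     new_messages = []
--     pending = None  # content of a system message waiting for its follower
--     for m in messages:
--         if m["role"] == "system":
--             if pending is not None:
--                 # two systems in a row: the earlier one becomes a user message
--                 new_messages.append({"role": "user", "content": pending})
--             pending = m["content"]
--         else:
--             if pending is not None:
--                 if m["role"] == "user" or m["role"] == "assistant":
--                     m["content"] = pending + " " + m["content"]
--                 pending = None
--             new_messages.append(m)
--     if pending is not None:
--         new_messages.append({"role": "user", "content": pending})
--     return new_messages
-- ===== Notes on version B (the rewrite author's own statement) =====
-- stated objective: simpler
-- what changed: Replaces the index-based loop that peeks at messages[i+1] (and mutates it) with a single forward pass carrying one 'pending' system-content state variable, removing all index arithmetic and lookahead.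
import Mathlib
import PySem

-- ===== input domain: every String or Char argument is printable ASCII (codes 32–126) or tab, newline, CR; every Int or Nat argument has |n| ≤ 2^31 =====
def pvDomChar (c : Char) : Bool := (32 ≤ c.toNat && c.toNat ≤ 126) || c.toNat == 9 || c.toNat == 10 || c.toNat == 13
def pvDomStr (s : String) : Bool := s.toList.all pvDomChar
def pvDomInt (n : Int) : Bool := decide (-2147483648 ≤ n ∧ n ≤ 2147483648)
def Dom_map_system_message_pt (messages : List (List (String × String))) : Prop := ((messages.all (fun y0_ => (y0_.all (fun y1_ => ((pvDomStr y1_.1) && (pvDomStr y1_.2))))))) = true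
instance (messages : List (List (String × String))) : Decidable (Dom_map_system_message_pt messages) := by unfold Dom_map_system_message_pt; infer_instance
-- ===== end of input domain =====

-- One honest line: B replaces A's index-based lookahead loop (which mutates
-- messages[i+1] in place) by a single forward pass carrying one pending
-- system-content state variable — simpler, same O(n) cost.  Both Pythons
-- mutate the merge-target dict in place; the equivalence proved here is about
-- the return value.

-- shared dict primitives (exact assoc-list model of a Python dict with unique keys:
-- d[k] lookup = first match; d[k] = v overwrites the first match in place, else appends)
def dictGet (m : List (String × String)) (k : String) : Option String :=
  match m with
  | [] => none
  | (k', v) :: t => if k' == k then some v else dictGet t k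

def dictSet (m : List (String × String)) (k v : String) : List (String × String) :=
  match m with
  | [] => [(k, v)]
  | (k', v') :: t => if k' == k then (k', v) :: t else (k', v') :: dictSet t k v

-- m["role"] / m["content"]; missing keys raise KeyError in Python and are excluded by Pre_
def roleOf (m : List (String × String)) : String := (dictGet m "role").getD ""
def contentOf (m : List (String × String)) : String := (dictGet m "content").getD ""

def mkUser (c : String) : List (String × String) := [("role", "user"), ("content", c)]

-- ===== PORT A =====
-- for i, m in enumerate(messages): index loop with lookahead messages[i+1] and
-- in-place mutation of messages[i+1] (modelled by List.set on the current list)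
-- fuel = number of remaining iterations (msgs.length - i), consumed one per step,
-- so the recursion is structural; started with msgs.length it never runs out
def aLoop (fuel : Nat) (msgs : List (List (String × String))) (i : Nat)
    (acc : List (List (String × String))) : List (List (String × String)) :=
  match fuel with
  | 0 => acc
  | fuel + 1 =>
    if i < msgs.length then
      let m := msgs.getD i []
      if roleOf m == "system" then
        if i < msgs.length - 1 then
          let next := msgs.getD (i + 1) []
          let nextRole := roleOf next
          if nextRole == "user" || nextRole == "assistant" then
            aLoop fuel (msgs.set (i + 1) (dictSet next "content" (contentOf m ++ " " ++ contentOf next))) (i + 1) acc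
          else if nextRole == "system" then
            aLoop fuel msgs (i + 1) (acc ++ [mkUser (contentOf m)])
          else
            aLoop fuel msgs (i + 1) acc
        else
          aLoop fuel msgs (i + 1) (acc ++ [mkUser (contentOf m)])
      else
        aLoop fuel msgs (i + 1) (acc ++ [m])
    else acc

def map_system_message_pt (messages : List (List (String × String))) : List (List (String × String)) :=
  aLoop messages.length messages 0 []

-- ===== PORT B =====
-- single forward pass; `pending` holds the content of an unmerged system message
def bGo (pending : Option String) (l : List (List (String × String))) : List (List (String × String)) :=
  match l with
  | [] =>
    match pending with
    | none => []
    | some c => [mkUser c]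
  | m :: rest =>
    if roleOf m == "system" then
      (match pending with
       | none => []
       | some c => [mkUser c]) ++ bGo (some (contentOf m)) rest
    else
      match pending with
      | none => m :: bGo none rest
      | some c =>
        if roleOf m == "user" || roleOf m == "assistant" then
          dictSet m "content" (c ++ " " ++ contentOf m) :: bGo none rest
        else
          m :: bGo none rest

def map_system_message_pt_alt (messages : List (List (String × String))) : List (List (String × String)) :=
  bGo none messages

-- ===== PRECONDITION & SPEC =====
-- Pre_ excludes exactly the inputs on which A raises KeyError: a message without
-- a "role" key, a system message without a "content" key, or a user/assistant
-- message that directly follows a system message and has no "content" key.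
def Pre_map_system_message_pt (messages : List (List (String × String))) : Prop :=
  (∀ m ∈ messages, (m.lookup "role").isSome = true ∧
      (m.lookup "role" = some "system" → (m.lookup "content").isSome = true)) ∧
  (∀ p ∈ messages.zip messages.tail,
      p.1.lookup "role" = some "system" →
      (p.2.lookup "role" = some "user" ∨ p.2.lookup "role" = some "assistant") →
      (p.2.lookup "content").isSome = true)
instance (messages : List (List (String × String))) : Decidable (Pre_map_system_message_pt messages) := by
  unfold Pre_map_system_message_pt; infer_instance

def pvWitness_map_system_message_pt : (List (List (String × String))) :=
  [[("role", "system"), ("content", "be brief")], [("role", "user"), ("content", "hi")]]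

def Spec_map_system_message_pt (messages : List (List (String × String))) (out : List (List (String × String))) : Prop := out = map_system_message_pt_alt messages
instance (messages : List (List (String × String))) (out : List (List (String × String))) : Decidable (Spec_map_system_message_pt messages out) := by unfold Spec_map_system_message_pt; infer_instance

-- ===== CLAIM (what is proved, stated in full; the proofs are below) =====
def Claim_equal_map_system_message_pt : Prop := ∀ (messages : List (List (String × String))), Dom_map_system_message_pt messages → Pre_map_system_message_pt messages → Spec_map_system_message_pt messages (map_system_message_pt messages)

-- ===== LEMMAS AND PROOFS =====

theorem getD_append_cons (pre : List (List (String × String))) (m : List (String × String))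
    (l : List (List (String × String))) : (pre ++ m :: l).getD pre.length [] = m := by
  induction pre with
  | nil => rfl
  | cons a t ih => simpa using ih

theorem set_append_right (pre l : List (List (String × String))) (j : Nat)
    (v : List (String × String)) : (pre ++ l).set (pre.length + j) v = pre ++ l.set j v := by
  induction pre with
  | nil => simp
  | cons a t ih => simpa [Nat.succ_add] using ih

theorem roleOf_dictSet (m : List (String × String)) (v : String) :
    roleOf (dictSet m "content" v) = roleOf m := by
  induction m with
  | nil => simp [roleOf, dictSet, dictGet]
  | cons p t ih =>
    obtain ⟨k, w⟩ := p
    by_cases hk : k = "content"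
    · subst hk; simp [roleOf, dictSet, dictGet]
    · simp only [roleOf, dictSet, dictGet, beq_iff_eq, hk, if_false]
      by_cases hr : k = "role"
      · simp [hr]
      · simpa [hr, roleOf] using ih

-- one-step unfolding of aLoop (plain rfl on the structural fuel match)
theorem aLoop_succ (fuel : Nat) (msgs : List (List (String × String))) (i : Nat)
    (acc : List (List (String × String))) :
    aLoop (fuel + 1) msgs i acc =
      (if i < msgs.length then
        let m := msgs.getD i []
        if roleOf m == "system" then
          if i < msgs.length - 1 then
            let next := msgs.getD (i + 1) []
            let nextRole := roleOf next
            if nextRole == "user" || nextRole == "assistant" then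
              aLoop fuel (msgs.set (i + 1) (dictSet next "content" (contentOf m ++ " " ++ contentOf next))) (i + 1) acc
            else if nextRole == "system" then
              aLoop fuel msgs (i + 1) (acc ++ [mkUser (contentOf m)])
            else
              aLoop fuel msgs (i + 1) acc
          else
            aLoop fuel msgs (i + 1) (acc ++ [mkUser (contentOf m)])
        else
          aLoop fuel msgs (i + 1) (acc ++ [m])
      else acc) := rfl

-- S1/S2: A's loop over pre ++ l, positioned at pre.length with exactly enough fuel,
-- equals acc ++ B's pass; S2 is the state where the element at the position is an
-- unmerged system message followed by l.
theorem aLoop_eq_bGo :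
    ∀ N : Nat,
      (∀ l pre acc, l.length = N →
        aLoop l.length (pre ++ l) pre.length acc = acc ++ bGo none l) ∧
      (∀ d l pre acc, l.length + 1 = N → roleOf d = "system" →
        aLoop (l.length + 1) (pre ++ d :: l) pre.length acc = acc ++ bGo (some (contentOf d)) l) := by
  intro N
  induction N using Nat.strong_induction_on with
  | _ N IH =>
    have hS2 : ∀ d l pre acc, l.length + 1 = N → roleOf d = "system" →
        aLoop (l.length + 1) (pre ++ d :: l) pre.length acc = acc ++ bGo (some (contentOf d)) l := by
      intro d l pre acc hN hd
      have hlen : pre.length < (pre ++ d :: l).length := by simp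
      have hget : (pre ++ d :: l).getD pre.length [] = d := getD_append_cons pre d l
      cases l with
      | nil =>
        have hlast : ¬ pre.length < (pre ++ [d]).length - 1 := by simp
        rw [show ([] : List (List (String × String))).length + 1 = 0 + 1 from rfl, aLoop_succ]
        rw [if_pos hlen]
        simp only [hget, hd, beq_self_eq_true, if_true]
        rw [if_neg hlast]
        simp [aLoop, bGo]
      | cons next rest =>
        have hN' : N = rest.length + 2 := by
          simp only [List.length_cons] at hN; omega
        have hmid : pre.length < (pre ++ d :: next :: rest).length - 1 := by
          simp only [List.length_append, List.length_cons]; omega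
        have hget2 : (pre ++ d :: next :: rest).getD (pre.length + 1) [] = next := by
          have := getD_append_cons (pre ++ [d]) next rest
          simpa using this
        rw [aLoop_succ]
        rw [if_pos hlen]
        simp only [hget, hget2, hd, beq_self_eq_true, if_true]
        rw [if_pos hmid]
        by_cases hua : (roleOf next == "user" || roleOf next == "assistant") = true
        · rw [if_pos hua]
          have hset : (pre ++ d :: next :: rest).set (pre.length + 1)
              (dictSet next "content" (contentOf d ++ " " ++ contentOf next))
              = pre ++ d :: (dictSet next "content" (contentOf d ++ " " ++ contentOf next)) :: rest := by
            have := set_append_right pre (d :: next :: rest) 1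
              (dictSet next "content" (contentOf d ++ " " ++ contentOf next))
            simpa using this
          rw [hset]
          have h1 := (IH (rest.length + 1) (by omega)).1
            ((dictSet next "content" (contentOf d ++ " " ++ contentOf next)) :: rest)
            (pre ++ [d]) acc rfl
          simp only [List.append_assoc, List.singleton_append, List.length_append,
            List.length_cons, List.length_nil, Nat.zero_add] at h1
          simp only [List.length_cons]
          rw [h1]
          have hns2 : ¬ roleOf next = "system" := by
            rcases Bool.or_eq_true_iff.mp hua with h | h
            · simp [eq_of_beq h]
            · simp [eq_of_beq h]
          simp only [bGo]
          simp [hns2, roleOf_dictSet, hua]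
        · rw [if_neg hua]
          by_cases hsys : (roleOf next == "system") = true
          · rw [if_pos hsys]
            have h2 := (IH (rest.length + 1) (by omega)).2 next rest (pre ++ [d])
              (acc ++ [mkUser (contentOf d)]) rfl (eq_of_beq hsys)
            simp only [List.append_assoc, List.singleton_append, List.length_append,
              List.length_cons, List.length_nil, Nat.zero_add] at h2
            simp only [List.length_cons]
            rw [h2]
            simp [bGo, hsys]
          · rw [if_neg hsys]
            have h1 := (IH (rest.length + 1) (by omega)).1 (next :: rest) (pre ++ [d]) acc rfl
            simp only [List.append_assoc, List.singleton_append, List.length_append,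
              List.length_cons, List.length_nil, Nat.zero_add] at h1
            simp only [List.length_cons]
            rw [h1]
            simp [bGo, hua, hsys]
    refine ⟨?_, hS2⟩
    intro l pre acc hN
    cases l with
    | nil =>
      simp [aLoop, bGo]
    | cons m rest =>
      by_cases hm : (roleOf m == "system") = true
      · have := hS2 m rest pre acc (by simpa using hN) (eq_of_beq hm)
        simp only [List.length_cons]
        rw [this]
        simp [bGo, hm]
      · have hN'' : N = rest.length + 1 := by
          simp only [List.length_cons] at hN; omega
        have hlen : pre.length < (pre ++ m :: rest).length := by simp
        have hget : (pre ++ m :: rest).getD pre.length [] = m := getD_append_cons pre m rest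
        simp only [List.length_cons]
        rw [aLoop_succ]
        rw [if_pos hlen]
        simp only [hget, hm, Bool.false_eq_true, if_false]
        have h1 := (IH rest.length (by omega)).1 rest (pre ++ [m]) (acc ++ [m]) rfl
        simp only [List.append_assoc, List.singleton_append, List.length_append,
          List.length_cons, List.length_nil, Nat.zero_add] at h1
        rw [h1]
        simp [bGo, hm]

-- ===== VERDICT (by name: the statement is the Claim_ definition above) =====
theorem map_system_message_pt_spec : Claim_equal_map_system_message_pt := by
  intro messages _hDom _hPre
  unfold Spec_map_system_message_pt map_system_message_pt map_system_message_pt_alt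
  have h := (aLoop_eq_bGo messages.length).1 messages [] [] rfl
  simpa using h
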